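-- pv_equiv track=rewrite | github.com/peter-lang/aoc | 1.py | digit_at
-- ===== SOURCE A (Python) =====
-- words = {
--     w: idx + 1
--     for idx, w in enumerate(
--         ["one", "two", "three", "four", "five", "six", "seven", "eight", "nine"]
--     )
-- }
--
-- def digit_at(s: str, pos: int, use_words: bool):
--     if s[pos].isdigit():
--         return int(s[pos])
--     if use_words:
--         for w, val in words.items():
--             if s[pos:].startswith(w):
--                 return val
--     return None
-- ===== SOURCE B (Python) =====
-- # A DFA (prefix automaton) over the nine digit words, built once at import time:
-- # transitions keyed by (state, char), accepting states map to the digit value.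
-- _WORDS = ["one", "two", "three", "four", "five", "six", "seven", "eight", "nine"]
-- _TRANS = {}
-- _ACCEPT = {}
-- _next_state = 1
-- for _idx, _w in enumerate(_WORDS):
--     _state = 0
--     for _ch in _w:
--         _key = (_state, _ch)
--         if _key not in _TRANS:
--             _TRANS[_key] = _next_state
--             _next_state += 1
--         _state = _TRANS[_key]
--     _ACCEPT[_state] = _idx + 1
--
--
-- def digit_at(s: str, pos: int, use_words: bool):
--     c = s[pos]
--     if c.isdigit():
--         return int(c)
--     if use_words:
--         state = 0
--         for ch in s[pos:]:
--             state = _TRANS.get((state, ch))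
--             if state is None:
--                 break
--             if state in _ACCEPT:
--                 return _ACCEPT[state]
--     return None
-- ===== Notes on version B (the rewrite author's own statement) =====
-- stated objective: alternative
-- what changed: Replaces the ordered startswith-scan over the nine words with a prefix automaton (DFA) built once at import time: the tail is consumed character by character via a (state, char) transition table, returning the value of the first accepting state reached.
import Mathlib
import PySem

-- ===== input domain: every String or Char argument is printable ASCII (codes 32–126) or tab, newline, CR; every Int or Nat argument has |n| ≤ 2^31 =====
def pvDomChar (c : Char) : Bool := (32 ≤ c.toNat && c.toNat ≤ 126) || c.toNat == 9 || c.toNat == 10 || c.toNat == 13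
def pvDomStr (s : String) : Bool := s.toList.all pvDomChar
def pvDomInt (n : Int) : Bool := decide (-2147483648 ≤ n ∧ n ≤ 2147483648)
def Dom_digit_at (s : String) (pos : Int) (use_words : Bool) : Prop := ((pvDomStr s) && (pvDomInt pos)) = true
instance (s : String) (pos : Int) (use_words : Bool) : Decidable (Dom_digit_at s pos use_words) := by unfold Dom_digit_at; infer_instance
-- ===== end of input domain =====

-- B replaces A's ordered startswith-scan over the nine words by a prefix
-- automaton (DFA): transitions keyed by (state, char), accepting states map to
-- the digit value; the tail is consumed character by character. Alternative
-- algorithm, same cost on these tiny words.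

-- ===== PORT A =====
-- words = {w: idx+1 for idx, w in enumerate([...])}, iterated in insertion order
def pvWordsA : List (List Char × Int) :=
  [("one".toList, 1), ("two".toList, 2), ("three".toList, 3), ("four".toList, 4),
   ("five".toList, 5), ("six".toList, 6), ("seven".toList, 7), ("eight".toList, 8),
   ("nine".toList, 9)]

-- 'for w, val in words.items(): if s[pos:].startswith(w): return val'
def pvScanA (ws : List (List Char × Int)) (tail : List Char) : Option Int :=
  match ws with
  | [] => none
  | (w, val) :: rest =>
    if PySem.Chars.startswith tail w then some val else pvScanA rest tail

def digit_at (s : String) (pos : Int) (use_words : Bool) : Option Int :=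
  match PySem.Str.pyGet? s pos with
  | none => none  -- s[pos] raises IndexError; excluded by Pre_digit_at
  | some c =>
    if PySem.Chars.isdigit c then
      some ((c.toNat : Int) - 48)  -- int(s[pos]) on a single ASCII digit: exact on Dom
    else if use_words then
      pvScanA pvWordsA (PySem.List.slice s.toList (some pos) none)
    else none

-- ===== PORT B =====
-- _TRANS and _ACCEPT exactly as the import-time loop in Source B builds them
-- (deterministic: states numbered in first-use order), written out literally.
def pvTransB : PySem.Dict (Int × Char) Int :=
  PySem.Dict.ofList
    [((0, 'o'), 1), ((1, 'n'), 2), ((2, 'e'), 3),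
     ((0, 't'), 4), ((4, 'w'), 5), ((5, 'o'), 6),
     ((4, 'h'), 7), ((7, 'r'), 8), ((8, 'e'), 9), ((9, 'e'), 10),
     ((0, 'f'), 11), ((11, 'o'), 12), ((12, 'u'), 13), ((13, 'r'), 14),
     ((11, 'i'), 15), ((15, 'v'), 16), ((16, 'e'), 17),
     ((0, 's'), 18), ((18, 'i'), 19), ((19, 'x'), 20),
     ((18, 'e'), 21), ((21, 'v'), 22), ((22, 'e'), 23), ((23, 'n'), 24),
     ((0, 'e'), 25), ((25, 'i'), 26), ((26, 'g'), 27), ((27, 'h'), 28), ((28, 't'), 29),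
     ((0, 'n'), 30), ((30, 'i'), 31), ((31, 'n'), 32), ((32, 'e'), 33)]

def pvAcceptB : PySem.Dict Int Int :=
  PySem.Dict.ofList
    [(3, 1), (6, 2), (10, 3), (14, 4), (17, 5), (20, 6), (24, 7), (29, 8), (33, 9)]

-- 'for ch in s[pos:]: state = _TRANS.get((state, ch)); if state is None: break;
--  if state in _ACCEPT: return _ACCEPT[state]'
def pvRunB (cs : List Char) (state : Int) : Option Int :=
  match cs with
  | [] => none
  | ch :: rest =>
    match PySem.Dict.get? pvTransB (state, ch) with
    | none => none  -- 'break', then fall through to 'return None'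
    | some st =>
      match PySem.Dict.get? pvAcceptB st with  -- 'if state in _ACCEPT: return _ACCEPT[state]'
      | some v => some v
      | none => pvRunB rest st

def digit_at_alt (s : String) (pos : Int) (use_words : Bool) : Option Int :=
  match PySem.Str.pyGet? s pos with
  | none => none  -- s[pos] raises IndexError; excluded by Pre_digit_at
  | some c =>
    if PySem.Chars.isdigit c then
      some ((c.toNat : Int) - 48)  -- int(c) on a single ASCII digit: exact on Dom
    else if use_words then
      pvRunB (PySem.List.slice s.toList (some pos) none) 0
    else none

-- ===== PRECONDITION & SPEC =====
-- Pre_ excludes exactly the positions where s[pos] raises IndexError (in A and in B alike).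
def Pre_digit_at (s : String) (pos : Int) (use_words : Bool) : Prop :=
  PySem.Raise.InRange s.toList.length pos
instance (s : String) (pos : Int) (use_words : Bool) : Decidable (Pre_digit_at s pos use_words) := by
  unfold Pre_digit_at; infer_instance

def pvWitness_digit_at : String × Int × Bool := ("xtwo1", 1, true)

def Spec_digit_at (s : String) (pos : Int) (use_words : Bool) (out : Option Int) : Prop := out = digit_at_alt s pos use_words
instance (s : String) (pos : Int) (use_words : Bool) (out : Option Int) : Decidable (Spec_digit_at s pos use_words out) := by unfold Spec_digit_at; infer_instance

-- ===== CLAIM (what is proved, stated in full; the proofs are below) =====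
def Claim_equal_digit_at : Prop := ∀ (s : String) (pos : Int) (use_words : Bool), Dom_digit_at s pos use_words → Pre_digit_at s pos use_words → Spec_digit_at s pos use_words (digit_at s pos use_words)

-- ===== LEMMAS AND PROOFS =====

theorem pv_get_nil {κ ν : Type} [BEq κ] (x : κ) :
    ({items := []} : PySem.Dict κ ν).get? x = none := rfl

-- the heart of the equivalence: A's ordered startswith-scan equals B's DFA run,
-- by a decision tree over the first characters of the tail
theorem pv_scan_eq_run (t0 : List Char) : pvScanA pvWordsA t0 = pvRunB t0 0 := by
  have hT : pvTransB = PySem.Dict.mk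
    [((0, 'o'), 1), ((1, 'n'), 2), ((2, 'e'), 3),
     ((0, 't'), 4), ((4, 'w'), 5), ((5, 'o'), 6),
     ((4, 'h'), 7), ((7, 'r'), 8), ((8, 'e'), 9), ((9, 'e'), 10),
     ((0, 'f'), 11), ((11, 'o'), 12), ((12, 'u'), 13), ((13, 'r'), 14),
     ((11, 'i'), 15), ((15, 'v'), 16), ((16, 'e'), 17),
     ((0, 's'), 18), ((18, 'i'), 19), ((19, 'x'), 20),
     ((18, 'e'), 21), ((21, 'v'), 22), ((22, 'e'), 23), ((23, 'n'), 24),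
     ((0, 'e'), 25), ((25, 'i'), 26), ((26, 'g'), 27), ((27, 'h'), 28), ((28, 't'), 29),
     ((0, 'n'), 30), ((30, 'i'), 31), ((31, 'n'), 32), ((32, 'e'), 33)] := by decide
  have hA : pvAcceptB = PySem.Dict.mk
    [(3, 1), (6, 2), (10, 3), (14, 4), (17, 5), (20, 6), (24, 7), (29, 8), (33, 9)] := by decide
  cases t0 with
  | nil => decide
  | cons c1 t1 =>
    by_cases h1_0 : ('o':Char) = c1
    · subst h1_0
      cases t1 with
      | nil => decide
      | cons c2 t2 =>
        by_cases h2_0 : ('n':Char) = c2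
        · subst h2_0
          cases t2 with
          | nil => decide
          | cons c3 t3 =>
            by_cases h3_0 : ('e':Char) = c3
            · subst h3_0
              simp [pvScanA, pvWordsA, pvRunB, hT, hA, PySem.Chars.startswith, List.isPrefixOf, PySem.Dict.get?_mk_cons, pv_get_nil, Prod.mk.injEq]
            · simp [pvScanA, pvWordsA, pvRunB, hT, hA, PySem.Chars.startswith, List.isPrefixOf, PySem.Dict.get?_mk_cons, pv_get_nil, Prod.mk.injEq, h3_0]
        · simp [pvScanA, pvWordsA, pvRunB, hT, hA, PySem.Chars.startswith, List.isPrefixOf, PySem.Dict.get?_mk_cons, pv_get_nil, Prod.mk.injEq, h2_0]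
    by_cases h1_1 : ('t':Char) = c1
    · subst h1_1
      cases t1 with
      | nil => decide
      | cons c2 t2 =>
        by_cases h2_0 : ('w':Char) = c2
        · subst h2_0
          cases t2 with
          | nil => decide
          | cons c3 t3 =>
            by_cases h3_0 : ('o':Char) = c3
            · subst h3_0
              simp [pvScanA, pvWordsA, pvRunB, hT, hA, PySem.Chars.startswith, List.isPrefixOf, PySem.Dict.get?_mk_cons, pv_get_nil, Prod.mk.injEq]
            · simp [pvScanA, pvWordsA, pvRunB, hT, hA, PySem.Chars.startswith, List.isPrefixOf, PySem.Dict.get?_mk_cons, pv_get_nil, Prod.mk.injEq, h3_0]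
        by_cases h2_1 : ('h':Char) = c2
        · subst h2_1
          cases t2 with
          | nil => decide
          | cons c3 t3 =>
            by_cases h3_0 : ('r':Char) = c3
            · subst h3_0
              cases t3 with
              | nil => decide
              | cons c4 t4 =>
                by_cases h4_0 : ('e':Char) = c4
                · subst h4_0
                  cases t4 with
                  | nil => decide
                  | cons c5 t5 =>
                    by_cases h5_0 : ('e':Char) = c5
                    · subst h5_0
                      simp [pvScanA, pvWordsA, pvRunB, hT, hA, PySem.Chars.startswith, List.isPrefixOf, PySem.Dict.get?_mk_cons, pv_get_nil, Prod.mk.injEq]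
                    · simp [pvScanA, pvWordsA, pvRunB, hT, hA, PySem.Chars.startswith, List.isPrefixOf, PySem.Dict.get?_mk_cons, pv_get_nil, Prod.mk.injEq, h5_0]
                · simp [pvScanA, pvWordsA, pvRunB, hT, hA, PySem.Chars.startswith, List.isPrefixOf, PySem.Dict.get?_mk_cons, pv_get_nil, Prod.mk.injEq, h4_0]
            · simp [pvScanA, pvWordsA, pvRunB, hT, hA, PySem.Chars.startswith, List.isPrefixOf, PySem.Dict.get?_mk_cons, pv_get_nil, Prod.mk.injEq, h3_0]
        · simp [pvScanA, pvWordsA, pvRunB, hT, hA, PySem.Chars.startswith, List.isPrefixOf, PySem.Dict.get?_mk_cons, pv_get_nil, Prod.mk.injEq, h2_0, h2_1]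
    by_cases h1_2 : ('f':Char) = c1
    · subst h1_2
      cases t1 with
      | nil => decide
      | cons c2 t2 =>
        by_cases h2_0 : ('o':Char) = c2
        · subst h2_0
          cases t2 with
          | nil => decide
          | cons c3 t3 =>
            by_cases h3_0 : ('u':Char) = c3
            · subst h3_0
              cases t3 with
              | nil => decide
              | cons c4 t4 =>
                by_cases h4_0 : ('r':Char) = c4
                · subst h4_0
                  simp [pvScanA, pvWordsA, pvRunB, hT, hA, PySem.Chars.startswith, List.isPrefixOf, PySem.Dict.get?_mk_cons, pv_get_nil, Prod.mk.injEq]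
                · simp [pvScanA, pvWordsA, pvRunB, hT, hA, PySem.Chars.startswith, List.isPrefixOf, PySem.Dict.get?_mk_cons, pv_get_nil, Prod.mk.injEq, h4_0]
            · simp [pvScanA, pvWordsA, pvRunB, hT, hA, PySem.Chars.startswith, List.isPrefixOf, PySem.Dict.get?_mk_cons, pv_get_nil, Prod.mk.injEq, h3_0]
        by_cases h2_1 : ('i':Char) = c2
        · subst h2_1
          cases t2 with
          | nil => decide
          | cons c3 t3 =>
            by_cases h3_0 : ('v':Char) = c3
            · subst h3_0
              cases t3 with
              | nil => decide
              | cons c4 t4 =>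
                by_cases h4_0 : ('e':Char) = c4
                · subst h4_0
                  simp [pvScanA, pvWordsA, pvRunB, hT, hA, PySem.Chars.startswith, List.isPrefixOf, PySem.Dict.get?_mk_cons, pv_get_nil, Prod.mk.injEq]
                · simp [pvScanA, pvWordsA, pvRunB, hT, hA, PySem.Chars.startswith, List.isPrefixOf, PySem.Dict.get?_mk_cons, pv_get_nil, Prod.mk.injEq, h4_0]
            · simp [pvScanA, pvWordsA, pvRunB, hT, hA, PySem.Chars.startswith, List.isPrefixOf, PySem.Dict.get?_mk_cons, pv_get_nil, Prod.mk.injEq, h3_0]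
        · simp [pvScanA, pvWordsA, pvRunB, hT, hA, PySem.Chars.startswith, List.isPrefixOf, PySem.Dict.get?_mk_cons, pv_get_nil, Prod.mk.injEq, h2_0, h2_1]
    by_cases h1_3 : ('s':Char) = c1
    · subst h1_3
      cases t1 with
      | nil => decide
      | cons c2 t2 =>
        by_cases h2_0 : ('i':Char) = c2
        · subst h2_0
          cases t2 with
          | nil => decide
          | cons c3 t3 =>
            by_cases h3_0 : ('x':Char) = c3
            · subst h3_0
              simp [pvScanA, pvWordsA, pvRunB, hT, hA, PySem.Chars.startswith, List.isPrefixOf, PySem.Dict.get?_mk_cons, pv_get_nil, Prod.mk.injEq]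
            · simp [pvScanA, pvWordsA, pvRunB, hT, hA, PySem.Chars.startswith, List.isPrefixOf, PySem.Dict.get?_mk_cons, pv_get_nil, Prod.mk.injEq, h3_0]
        by_cases h2_1 : ('e':Char) = c2
        · subst h2_1
          cases t2 with
          | nil => decide
          | cons c3 t3 =>
            by_cases h3_0 : ('v':Char) = c3
            · subst h3_0
              cases t3 with
              | nil => decide
              | cons c4 t4 =>
                by_cases h4_0 : ('e':Char) = c4
                · subst h4_0
                  cases t4 with
                  | nil => decide
                  | cons c5 t5 =>
                    by_cases h5_0 : ('n':Char) = c5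
                    · subst h5_0
                      simp [pvScanA, pvWordsA, pvRunB, hT, hA, PySem.Chars.startswith, List.isPrefixOf, PySem.Dict.get?_mk_cons, pv_get_nil, Prod.mk.injEq]
                    · simp [pvScanA, pvWordsA, pvRunB, hT, hA, PySem.Chars.startswith, List.isPrefixOf, PySem.Dict.get?_mk_cons, pv_get_nil, Prod.mk.injEq, h5_0]
                · simp [pvScanA, pvWordsA, pvRunB, hT, hA, PySem.Chars.startswith, List.isPrefixOf, PySem.Dict.get?_mk_cons, pv_get_nil, Prod.mk.injEq, h4_0]
            · simp [pvScanA, pvWordsA, pvRunB, hT, hA, PySem.Chars.startswith, List.isPrefixOf, PySem.Dict.get?_mk_cons, pv_get_nil, Prod.mk.injEq, h3_0]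
        · simp [pvScanA, pvWordsA, pvRunB, hT, hA, PySem.Chars.startswith, List.isPrefixOf, PySem.Dict.get?_mk_cons, pv_get_nil, Prod.mk.injEq, h2_0, h2_1]
    by_cases h1_4 : ('e':Char) = c1
    · subst h1_4
      cases t1 with
      | nil => decide
      | cons c2 t2 =>
        by_cases h2_0 : ('i':Char) = c2
        · subst h2_0
          cases t2 with
          | nil => decide
          | cons c3 t3 =>
            by_cases h3_0 : ('g':Char) = c3
            · subst h3_0
              cases t3 with
              | nil => decide
              | cons c4 t4 =>
                by_cases h4_0 : ('h':Char) = c4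
                · subst h4_0
                  cases t4 with
                  | nil => decide
                  | cons c5 t5 =>
                    by_cases h5_0 : ('t':Char) = c5
                    · subst h5_0
                      simp [pvScanA, pvWordsA, pvRunB, hT, hA, PySem.Chars.startswith, List.isPrefixOf, PySem.Dict.get?_mk_cons, pv_get_nil, Prod.mk.injEq]
                    · simp [pvScanA, pvWordsA, pvRunB, hT, hA, PySem.Chars.startswith, List.isPrefixOf, PySem.Dict.get?_mk_cons, pv_get_nil, Prod.mk.injEq, h5_0]
                · simp [pvScanA, pvWordsA, pvRunB, hT, hA, PySem.Chars.startswith, List.isPrefixOf, PySem.Dict.get?_mk_cons, pv_get_nil, Prod.mk.injEq, h4_0]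
            · simp [pvScanA, pvWordsA, pvRunB, hT, hA, PySem.Chars.startswith, List.isPrefixOf, PySem.Dict.get?_mk_cons, pv_get_nil, Prod.mk.injEq, h3_0]
        · simp [pvScanA, pvWordsA, pvRunB, hT, hA, PySem.Chars.startswith, List.isPrefixOf, PySem.Dict.get?_mk_cons, pv_get_nil, Prod.mk.injEq, h2_0]
    by_cases h1_5 : ('n':Char) = c1
    · subst h1_5
      cases t1 with
      | nil => decide
      | cons c2 t2 =>
        by_cases h2_0 : ('i':Char) = c2
        · subst h2_0
          cases t2 with
          | nil => decide
          | cons c3 t3 =>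
            by_cases h3_0 : ('n':Char) = c3
            · subst h3_0
              cases t3 with
              | nil => decide
              | cons c4 t4 =>
                by_cases h4_0 : ('e':Char) = c4
                · subst h4_0
                  simp [pvScanA, pvWordsA, pvRunB, hT, hA, PySem.Chars.startswith, List.isPrefixOf, PySem.Dict.get?_mk_cons, pv_get_nil, Prod.mk.injEq]
                · simp [pvScanA, pvWordsA, pvRunB, hT, hA, PySem.Chars.startswith, List.isPrefixOf, PySem.Dict.get?_mk_cons, pv_get_nil, Prod.mk.injEq, h4_0]
            · simp [pvScanA, pvWordsA, pvRunB, hT, hA, PySem.Chars.startswith, List.isPrefixOf, PySem.Dict.get?_mk_cons, pv_get_nil, Prod.mk.injEq, h3_0]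
        · simp [pvScanA, pvWordsA, pvRunB, hT, hA, PySem.Chars.startswith, List.isPrefixOf, PySem.Dict.get?_mk_cons, pv_get_nil, Prod.mk.injEq, h2_0]
    · simp [pvScanA, pvWordsA, pvRunB, hT, PySem.Chars.startswith, List.isPrefixOf, PySem.Dict.get?_mk_cons, pv_get_nil, Prod.mk.injEq, h1_0, h1_1, h1_2, h1_3, h1_4, h1_5]

-- ===== VERDICT (by name: the statement is the Claim_ definition above) =====
theorem digit_at_spec : Claim_equal_digit_at := by
  intro s pos use_words _ _
  unfold Spec_digit_at digit_at digit_at_alt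
  cases PySem.Str.pyGet? s pos with
  | none => rfl
  | some c =>
    by_cases hd : PySem.Chars.isdigit c = true
    · simp [hd]
    · cases use_words with
      | false => simp [hd]
      | true => simp [hd, pv_scan_eq_run]
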